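-- pv_equiv track=rewrite | github.com/burning-calamity/extirpation | src/extirpation/bundled_online/jefferson_disk.py | jefferson_disk_decrypt
-- ===== SOURCE A (Python) =====
-- ALPHABET = 'ABCDEFGHIJKLMNOPQRSTUVWXYZ'
--
-- def _sanitize_wheels(wheels: tuple[int, ...] | list[int] | None) -> list[int]:
--     if not wheels:
--         return [3, 1, 4, 1, 5]
--     vals = [int(x) % 26 for x in wheels]
--     return vals or [0]
--
-- def _shift(ch: str, amount: int) -> str:
--     if ch.upper() not in ALPHABET:
--         return ch
--     idx = ALPHABET.index(ch.upper())
--     out = ALPHABET[(idx + amount) % 26]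
--     return out if ch.isupper() else out.lower()
--
-- def jefferson_disk_decrypt(ciphertext: str, wheels: tuple[int, ...] | list[int] | None = None) -> str:
--     """Decrypt text produced by ``jefferson_disk_encrypt``."""
--     wheel = _sanitize_wheels(wheels)
--     out: list[str] = []
--     i = 0
--     for ch in ciphertext:
--         if ch.upper() in ALPHABET:
--             out.append(_shift(ch, -wheel[i % len(wheel)]))
--             i += 1
--         else:
--             out.append(ch)
--     return ''.join(out)
-- ===== SOURCE B (Python) =====
-- ALPHABET = 'ABCDEFGHIJKLMNOPQRSTUVWXYZ'
--
-- def _sanitize_wheels(wheels):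
--     if not wheels:
--         return [3, 1, 4, 1, 5]
--     vals = [int(x) % 26 for x in wheels]
--     return vals or [0]
--
-- def _shift(ch, amount):
--     if ch.upper() not in ALPHABET:
--         return ch
--     idx = ALPHABET.index(ch.upper())
--     out = ALPHABET[(idx + amount) % 26]
--     return out if ch.isupper() else out.lower()
--
-- def jefferson_disk_decrypt(ciphertext, wheels=None):
--     """Decrypt text produced by ``jefferson_disk_encrypt``."""
--     wheel = _sanitize_wheels(wheels)
--     letters = [ch for ch in ciphertext if ch.upper() in ALPHABET]
--     decrypted = [_shift(ch, -wheel[j % len(wheel)]) for j, ch in enumerate(letters)]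
--     it = iter(decrypted)
--     return ''.join(next(it) if ch.upper() in ALPHABET else ch for ch in ciphertext)
-- ===== Notes on version B (the rewrite author's own statement) =====
-- stated objective: alternative
-- what changed: Replaces A's single counter-carrying loop with three separate passes: filter the alphabetic characters, decrypt that letter list by its own index via enumerate, then splice the decrypted letters back over the original text with an iterator.
import Mathlib
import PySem

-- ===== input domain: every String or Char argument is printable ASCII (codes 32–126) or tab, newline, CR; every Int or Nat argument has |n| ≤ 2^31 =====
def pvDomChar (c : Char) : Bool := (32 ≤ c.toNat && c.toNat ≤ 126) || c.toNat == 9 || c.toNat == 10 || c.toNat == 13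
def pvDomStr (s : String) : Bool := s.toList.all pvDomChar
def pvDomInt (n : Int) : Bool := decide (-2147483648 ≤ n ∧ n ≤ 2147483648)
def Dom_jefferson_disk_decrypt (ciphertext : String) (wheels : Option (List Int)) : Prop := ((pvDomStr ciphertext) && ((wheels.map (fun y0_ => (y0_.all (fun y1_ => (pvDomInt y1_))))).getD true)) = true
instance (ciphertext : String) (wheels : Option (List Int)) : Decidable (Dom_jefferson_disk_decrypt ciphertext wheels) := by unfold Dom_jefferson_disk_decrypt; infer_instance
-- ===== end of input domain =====

-- B splits the work into three passes (filter the letters, decrypt them by index,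
-- splice them back) instead of A's single counter-carrying loop; objective: alternative decomposition.

-- ===== PORT A =====
def pvAlphabet : List Char := "ABCDEFGHIJKLMNOPQRSTUVWXYZ".toList

-- `ch.upper() in ALPHABET` (exact on the ASCII domain)
def pvIsLetter (c : Char) : Bool := pvAlphabet.contains (PySem.Chars.upperChar c)

def pvSanitizeWheels (wheels : Option (List Int)) : List Int :=
  match wheels with
  | none => [3, 1, 4, 1, 5]
  | some [] => [3, 1, 4, 1, 5]
  | some ws =>
    let vals := ws.map (fun x => PySem.Int.mod x 26)
    if vals = [] then [0] else vals

-- `_shift` (exact on the ASCII domain)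
def pvShift (c : Char) (amount : Int) : Char :=
  if ¬ pvAlphabet.contains (PySem.Chars.upperChar c) then c
  else
    let idx := (PySem.List.index? pvAlphabet (PySem.Chars.upperChar c)).getD 0
    let out := pvAlphabet.getD (PySem.Int.mod ((idx : Int) + amount) 26).toNat 'A'
    if PySem.Chars.isupper c then out else PySem.Chars.lowerChar out

-- A's for-loop over the characters, carrying the letter counter i
def pvLoopA (wheel : List Int) : List Char → Nat → List Char
  | [], _ => []
  | c :: cs, i =>
    if pvIsLetter c then
      pvShift c (-(wheel.getD (i % wheel.length) 0)) :: pvLoopA wheel cs (i + 1)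
    else c :: pvLoopA wheel cs i

def jefferson_disk_decrypt (ciphertext : String) (wheels : Option (List Int)) : String :=
  String.mk (pvLoopA (pvSanitizeWheels wheels) ciphertext.toList 0)

-- ===== PORT B =====
-- `[_shift(ch, -wheel[j % len(wheel)]) for j, ch in enumerate(letters)]`
def pvDecrypted (wheel : List Int) (letters : List Char) : List Char :=
  (PySem.List.enumerate letters 0).map
    (fun p => pvShift p.2 (-(wheel.getD ((PySem.Int.mod p.1 wheel.length).toNat) 0)))

-- the final generator: `next(it)` on letters, the original char otherwise
def pvSplice : List Char → List Char → List Char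
  | [], _ => []
  | c :: cs, ds =>
    if pvIsLetter c then
      match ds with
      | d :: ds' => d :: pvSplice cs ds'
      | [] => []   -- unreachable: `decrypted` has exactly one entry per letter
    else c :: pvSplice cs ds

def jefferson_disk_decrypt_alt (ciphertext : String) (wheels : Option (List Int)) : String :=
  let wheel := pvSanitizeWheels wheels
  let letters := ciphertext.toList.filter pvIsLetter
  String.mk (pvSplice ciphertext.toList (pvDecrypted wheel letters))

-- ===== PRECONDITION & SPEC =====
def Spec_jefferson_disk_decrypt (ciphertext : String) (wheels : Option (List Int)) (out : String) : Prop := out = jefferson_disk_decrypt_alt ciphertext wheels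
instance (ciphertext : String) (wheels : Option (List Int)) (out : String) : Decidable (Spec_jefferson_disk_decrypt ciphertext wheels out) := by unfold Spec_jefferson_disk_decrypt; infer_instance

-- ===== CLAIM (what is proved, stated in full; the proofs are below) =====
def Claim_equal_jefferson_disk_decrypt : Prop := ∀ (ciphertext : String) (wheels : Option (List Int)), Dom_jefferson_disk_decrypt ciphertext wheels → Spec_jefferson_disk_decrypt ciphertext wheels (jefferson_disk_decrypt ciphertext wheels)

-- ===== LEMMAS AND PROOFS =====

-- B's decryption of the letter list, started at letter counter i
def pvDecFrom (wheel : List Int) : Nat → List Char → List Char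
  | _, [] => []
  | i, c :: cs =>
    pvShift c (-(wheel.getD (i % wheel.length) 0)) :: pvDecFrom wheel (i + 1) cs

theorem pvDecrypted_eq_decFrom (wheel : List Int) (ls : List Char) :
    pvDecrypted wheel ls = pvDecFrom wheel 0 ls := by
  suffices h : ∀ (i : Nat) (ls : List Char),
      ((PySem.List.enumerate ls (i : Int)).map
        (fun p => pvShift p.2 (-(wheel.getD ((PySem.Int.mod p.1 wheel.length).toNat) 0)))) =
      pvDecFrom wheel i ls by
    simpa [pvDecrypted] using h 0 ls
  intro i ls
  induction ls generalizing i with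
  | nil => simp [PySem.List.enumerate_nil, pvDecFrom]
  | cons c cs ih =>
    rw [PySem.List.enumerate_cons]
    simp only [List.map_cons, pvDecFrom]
    congr 1
    · have hm : (PySem.Int.mod (i : Int) (wheel.length : Int)).toNat = i % wheel.length := by
        simp [PySem.Int.mod_natCast]
        omega
      rw [hm]
    · have : ((i : Int) + 1) = ((i + 1 : Nat) : Int) := by push_cast; ring
      rw [this]; exact ih (i + 1)

theorem pvLoopA_eq_splice (wheel : List Int) (cs : List Char) (i : Nat) :
    pvLoopA wheel cs i = pvSplice cs (pvDecFrom wheel i (cs.filter pvIsLetter)) := by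
  induction cs generalizing i with
  | nil => simp [pvLoopA, pvSplice]
  | cons c cs ih =>
    by_cases h : pvIsLetter c
    · simp [pvLoopA, pvSplice, h, pvDecFrom, ih]
    · simp [pvLoopA, pvSplice, h, ih]

-- ===== VERDICT (by name: the statement is the Claim_ definition above) =====
theorem jefferson_disk_decrypt_spec : Claim_equal_jefferson_disk_decrypt := by
  intro ciphertext wheels _
  unfold Spec_jefferson_disk_decrypt jefferson_disk_decrypt jefferson_disk_decrypt_alt
  simp only [pvDecrypted_eq_decFrom, pvLoopA_eq_splice]
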